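-- pv_equiv track=rewrite | github.com/sunil-aws-86/amazon-bedrock-agentcore-samples | 02-use-cases/SRE-agent/sre_agent/memory/hooks.py | _organize_memories_by_agent
-- ===== SOURCE A (Python) =====
-- from typing import Dict, Any, Optional, List
--
-- def _organize_memories_by_agent(
--
--     memories: List[Dict[str, Any]]
-- ) -> Dict[str, List[Dict[str, Any]]]:
--     """Organize memories by agent based on their namespace."""
--     memories_by_agent = {}
--
--     for memory in memories:
--         # Extract agent from namespace (format: /sre/infrastructure/{agent_id})
--         namespaces = memory.get("namespaces", [])
--         if namespaces and len(namespaces) > 0: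
--             namespace = namespaces[0]
--             # Extract agent_id from namespace like "/sre/infrastructure/kubernetes-agent"
--             parts = namespace.split("/")
--             if len(parts) >= 4 and parts[1] == "sre" and parts[2] == "infrastructure":
--                 agent_id = parts[3]
--                 if agent_id not in memories_by_agent:
--                     memories_by_agent[agent_id] = []
--                 memories_by_agent[agent_id].append(memory)
--             else:
--                 # Fallback for unknown namespace format
--                 if "unknown" not in memories_by_agent:
--                     memories_by_agent["unknown"] = []
--                 memories_by_agent["unknown"].append(memory)
--         else:
--             # No namespace found
--             if "unknown" not in memories_by_agent:
--                 memories_by_agent["unknown"] = []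
--             memories_by_agent["unknown"].append(memory)
--
--     return memories_by_agent
-- ===== SOURCE B (Python) =====
-- from typing import Dict, Any, List
--
--
-- def _agent_key(memory: Dict[str, Any]) -> str:
--     """Key under which A files this memory: agent_id from the first namespace, else 'unknown'."""
--     namespaces = memory.get("namespaces", [])
--     if not namespaces:
--         return "unknown"
--     parts = namespaces[0].split("/")
--     if len(parts) >= 4 and parts[1] == "sre" and parts[2] == "infrastructure":
--         return parts[3]
--     return "unknown"
--
--
-- def _organize_memories_by_agent(
--     memories: List[Dict[str, Any]]
-- ) -> Dict[str, List[Dict[str, Any]]]: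
--     """Organize memories by agent based on their namespace."""
--     ordered_keys = list(dict.fromkeys(_agent_key(m) for m in memories))
--     return {k: [m for m in memories if _agent_key(m) == k] for k in ordered_keys}
-- ===== Notes on version B (the rewrite author's own statement) =====
-- stated objective: alternative
-- what changed: Replaces A's single incremental dict-growing pass with a two-pass decomposition: a key extractor, an ordered dedup of the keys, and one filter per key to build each group.
import Mathlib
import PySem

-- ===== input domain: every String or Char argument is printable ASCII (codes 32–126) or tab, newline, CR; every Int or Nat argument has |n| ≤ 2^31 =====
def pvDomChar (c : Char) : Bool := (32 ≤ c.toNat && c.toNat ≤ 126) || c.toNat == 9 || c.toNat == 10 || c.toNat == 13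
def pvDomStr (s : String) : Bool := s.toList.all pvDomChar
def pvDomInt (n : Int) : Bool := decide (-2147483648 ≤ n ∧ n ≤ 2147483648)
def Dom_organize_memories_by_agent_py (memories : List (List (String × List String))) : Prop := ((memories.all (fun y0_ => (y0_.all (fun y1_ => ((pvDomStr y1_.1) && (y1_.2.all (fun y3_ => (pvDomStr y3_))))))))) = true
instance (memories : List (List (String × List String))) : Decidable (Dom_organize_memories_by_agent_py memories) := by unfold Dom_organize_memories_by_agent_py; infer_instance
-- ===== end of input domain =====

-- B replaces A's incremental dict-growing pass by a two-pass decomposition: extract each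
-- memory's agent key, ordered-dedup the keys, and build each group by filtering; objective:
-- alternative (structurally different, not faster).

-- ===== PORT A =====
-- Python: if agent_id not in d: d[agent_id] = []; d[agent_id].append(memory)
def pvUpdA (d : PySem.Dict String (List (List (String × List String)))) (k : String)
    (memory : List (String × List String)) : PySem.Dict String (List (List (String × List String))) :=
  let d1 := if d.contains k then d else d.insert k []
  d1.modify k [] (· ++ [memory])

def organize_memories_by_agent_py (memories : List (List (String × List String))) : List (String × List (List (String × List String))) :=
  (memories.foldl (fun d memory =>
    let namespaces := (PySem.Dict.mk memory).getD "namespaces" []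
    match namespaces with
    | [] => pvUpdA d "unknown" memory            -- 'if namespaces and len(namespaces) > 0' fails
    | ns0 :: _ =>
      let parts := (PySem.Str.split? ns0 "/").getD []   -- sep "/" ≠ "": split? is always some
      if parts.length ≥ 4 ∧ parts.getD 1 "" = "sre" ∧ parts.getD 2 "" = "infrastructure" then
        pvUpdA d (parts.getD 3 "") memory
      else
        pvUpdA d "unknown" memory)
    PySem.Dict.empty).items

-- ===== PORT B =====
def agent_key (memory : List (String × List String)) : String :=
  let namespaces := (PySem.Dict.mk memory).getD "namespaces" []
  match namespaces with
  | [] => "unknown"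
  | ns0 :: _ =>
    let parts := (PySem.Str.split? ns0 "/").getD []
    if parts.length ≥ 4 ∧ parts.getD 1 "" = "sre" ∧ parts.getD 2 "" = "infrastructure" then
      parts.getD 3 ""
    else "unknown"

def organize_memories_by_agent_py_alt (memories : List (List (String × List String))) : List (String × List (List (String × List String))) :=
  (PySem.List.dedup (memories.map agent_key)).map
    (fun k => (k, memories.filter (fun m => agent_key m == k)))

-- ===== PRECONDITION & SPEC =====
def Spec_organize_memories_by_agent_py (memories : List (List (String × List String))) (out : List (String × List (List (String × List String)))) : Prop := out = organize_memories_by_agent_py_alt memories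
instance (memories : List (List (String × List String))) (out : List (String × List (List (String × List String)))) : Decidable (Spec_organize_memories_by_agent_py memories out) := by unfold Spec_organize_memories_by_agent_py; infer_instance

-- ===== CLAIM (what is proved, stated in full; the proofs are below) =====
def Claim_equal_organize_memories_by_agent_py : Prop := ∀ (memories : List (List (String × List String))), Dom_organize_memories_by_agent_py memories → Spec_organize_memories_by_agent_py memories (organize_memories_by_agent_py memories)

-- ===== LEMMAS AND PROOFS =====

-- A's two-step update (ensure key, then append) is exactly Dict.modify with default [].
theorem pvUpdA_eq_modify (d : PySem.Dict String (List (List (String × List String)))) (k : String)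
    (m : List (String × List String)) : pvUpdA d k m = d.modify k [] (· ++ [m]) := by
  unfold pvUpdA
  cases h : d.contains k with
  | true => simp
  | false =>
    simp only [Bool.false_eq_true, if_false, PySem.Dict.modify,
      PySem.Dict.getD_insert_self, PySem.Dict.insert_insert_self, List.nil_append]
    rw [PySem.Dict.getD_of_not_contains d ([] : List (List (String × List String))) h,
      List.nil_append]

-- A's branch structure computes agent_key and then performs one modify.
theorem stepA_eq (d : PySem.Dict String (List (List (String × List String))))
    (m : List (String × List String)) :
    (let namespaces := (PySem.Dict.mk m).getD "namespaces" []
     match namespaces with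
     | [] => pvUpdA d "unknown" m
     | ns0 :: _ =>
       let parts := (PySem.Str.split? ns0 "/").getD []
       if parts.length ≥ 4 ∧ parts.getD 1 "" = "sre" ∧ parts.getD 2 "" = "infrastructure" then
         pvUpdA d (parts.getD 3 "") m
       else pvUpdA d "unknown" m)
    = d.modify (agent_key m) [] (· ++ [m]) := by
  unfold agent_key
  cases h : (PySem.Dict.mk m).getD "namespaces" [] with
  | nil => simp [pvUpdA_eq_modify]
  | cons ns0 rest =>
    simp only []
    split_ifs <;> simp [pvUpdA_eq_modify]

-- a Nodup-keyed dict's items are its keys paired with their getD values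
theorem items_eq_keys_map {κ ν : Type} [BEq κ] [LawfulBEq κ] (d : PySem.Dict κ ν) (d0 : ν)
    (h : d.keys.Nodup) : d.items = d.keys.map (fun k => (k, d.getD k d0)) := by
  simp only [PySem.Dict.keys, List.map_map]
  conv_lhs => rw [← List.map_id d.items]
  exact List.map_congr_left (fun p hp => by
    obtain ⟨k, v⟩ := p
    simp [PySem.Dict.getD_of_mem_items d hp h d0])

-- the collapsed loop's entry at key c is the filter of the input at that key
theorem getD_loop (memories : List (List (String × List String))) (c : String) :
    (memories.foldl (fun d m => d.modify (agent_key m) [] (· ++ [m])) PySem.Dict.empty).getD c []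
      = memories.filter (fun m => agent_key m == c) := by
  have h := PySem.Dict.getD_foldl_modify_append
    (memories.map (fun m => (agent_key m, m))) PySem.Dict.empty c
  rw [List.foldl_map] at h
  have hb : (fun (x : PySem.Dict String (List (List (String × List String))))
        (y : List (String × List String)) =>
        (fun (d : PySem.Dict String (List (List (String × List String))))
          (p : String × List (String × List String)) => d.modify p.1 [] (fun v => v ++ [p.2])) x
          ((fun m => (agent_key m, m)) y))
      = (fun d m => PySem.Dict.modify d (agent_key m) [] (fun v => v ++ [m])) := rfl
  rw [hb] at h
  rw [h]
  simp [List.filter_map, Function.comp_def]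

theorem organize_eq (memories : List (List (String × List String))) :
    organize_memories_by_agent_py memories = organize_memories_by_agent_py_alt memories := by
  unfold organize_memories_by_agent_py organize_memories_by_agent_py_alt
  have hfun : (fun (d : PySem.Dict String (List (List (String × List String)))) memory =>
      let namespaces := (PySem.Dict.mk memory).getD "namespaces" []
      match namespaces with
      | [] => pvUpdA d "unknown" memory
      | ns0 :: _ =>
        let parts := (PySem.Str.split? ns0 "/").getD []
        if parts.length ≥ 4 ∧ parts.getD 1 "" = "sre" ∧ parts.getD 2 "" = "infrastructure" then
          pvUpdA d (parts.getD 3 "") memory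
        else pvUpdA d "unknown" memory)
      = (fun d m => d.modify (agent_key m) [] (· ++ [m])) :=
    funext fun d => funext fun m => stepA_eq d m
  rw [hfun]
  have hkeys : (memories.foldl (fun d m => d.modify (agent_key m) [] (· ++ [m]))
      PySem.Dict.empty).keys = PySem.Set.ofList (memories.map agent_key) := by
    rw [PySem.Dict.keys_foldl_modify_key memories agent_key [] (fun _ x => (· ++ [x]))
        PySem.Dict.empty]
    simp [PySem.Set.update_nil_left]
  have hnodup : (memories.foldl (fun d m => d.modify (agent_key m) [] (· ++ [m]))
      PySem.Dict.empty).keys.Nodup :=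
    PySem.Dict.nodup_keys_foldl_modify_key memories agent_key [] (fun _ x => (· ++ [x]))
      PySem.Dict.empty (by simp)
  rw [items_eq_keys_map _ [] hnodup, hkeys, PySem.List.dedup_eq_ofList]
  exact List.map_congr_left fun k _ => by rw [getD_loop]

-- ===== VERDICT (by name: the statement is the Claim_ definition above) =====
theorem organize_memories_by_agent_py_spec : Claim_equal_organize_memories_by_agent_py := by
  intro memories _
  unfold Spec_organize_memories_by_agent_py
  exact organize_eq memories
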